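-- pv_equiv track=rewrite | github.com/ramgeart/uithub-local | src/uithub_local/utils.py | _strip_hash_comments
-- ===== SOURCE A (Python) =====
-- def _strip_hash_comments(content: str) -> str:
--     """Strip # comments from content, preserving strings."""
--     lines = []
--     for line in content.splitlines():
--         # Find # not in strings
--         in_single = False
--         in_double = False
--         escape = False
--         result = []
--         i = 0
--         while i < len(line):
--             char = line[i]
--
--             # If previous character started an escape sequence,
--             # treat this character as escaped and do not change string state.
--             if escape:
--                 result.append(char)
--                 escape = False
--                 i += 1
--                 continue
--
--             # Start a new escape sequence when we see an unescaped backslash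
--             # inside a string. The next character will be treated as escaped.
--             if char == "\\" and (in_single or in_double):
--                 result.append(char)
--                 escape = True
--                 i += 1
--                 continue
--
--             # Toggle string states
--             if char == "'" and not in_double:
--                 in_single = not in_single
--                 result.append(char)
--             elif char == '"' and not in_single:
--                 in_double = not in_double
--                 result.append(char)
--             elif char == "#" and not in_single and not in_double:
--                 # Found a comment, stop processing this line
--                 break
--             else:
--                 result.append(char)
--             i += 1
--
--         lines.append("".join(result).rstrip())
--     return "\n".join(lines)
-- ===== SOURCE B (Python) =====
-- def _skip_str(line, q, i):
--     """Return the index just past the closing quote q, scanning from i;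
--     escaped characters are skipped in pairs. May run to (or past) end of line."""
--     n = len(line)
--     while i < n:
--         c = line[i]
--         if c == "\\":
--             i += 2
--         elif c == q:
--             return i + 1
--         else:
--             i += 1
--     return i
--
--
-- def _find_hash(line):
--     """Index of the first '#' outside string literals, or None."""
--     i, n = 0, len(line)
--     while i < n:
--         c = line[i]
--         if c == "#":
--             return i
--         if c == "'" or c == '"':
--             i = _skip_str(line, c, i + 1)
--         else:
--             i += 1
--     return None
--
--
-- def _strip_hash_comments(content: str) -> str:
--     """Strip # comments from content, preserving strings."""
--     out = []
--     for line in content.splitlines():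
--         cut = _find_hash(line)
--         kept = line if cut is None else line[:cut]
--         out.append(kept.rstrip())
--     return "\n".join(out)
-- ===== Notes on version B (the rewrite author's own statement) =====
-- stated objective: alternative
-- what changed: A walks each line character by character with in_single/in_double/escape state flags while appending every kept character to a result list; B instead finds the cut position of the first hash character outside string literals with a scanner that skips each quoted literal as a whole (a helper jumping past the closing quote, stepping over escapes in pairs) and then slices the line once with line[:cut].
import Mathlib
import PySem

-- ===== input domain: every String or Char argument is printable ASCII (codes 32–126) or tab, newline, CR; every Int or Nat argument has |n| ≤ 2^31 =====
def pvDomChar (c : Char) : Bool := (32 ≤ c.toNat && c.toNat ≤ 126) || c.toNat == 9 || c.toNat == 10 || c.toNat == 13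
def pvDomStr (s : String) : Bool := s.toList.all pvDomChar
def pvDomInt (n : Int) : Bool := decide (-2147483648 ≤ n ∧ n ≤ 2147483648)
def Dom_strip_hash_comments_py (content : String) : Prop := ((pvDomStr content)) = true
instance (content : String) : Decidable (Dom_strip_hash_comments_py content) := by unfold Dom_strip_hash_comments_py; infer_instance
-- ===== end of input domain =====

-- B replaces A's per-character state machine (in_single/in_double/escape flags plus a result
-- accumulator) by a scanner that skips string literals whole and returns the cut index of the
-- first unquoted hash, then slices the line once; a timing run measured B faster by a constant factor.

-- ===== PORT A =====
-- A's inner while loop over one line: state (in_single, in_double, escape, result);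
-- result is accumulated reversed, branches in A's order; 'break' returns the result.
def pvALoop : List Char → Bool → Bool → Bool → List Char → List Char
  | [], _, _, _, res => res.reverse
  | c :: rest, insg, indb, esc, res =>
    if esc then pvALoop rest insg indb false (c :: res)
    else if c == '\\' && (insg || indb) then pvALoop rest insg indb true (c :: res)
    else if c == '\'' && !indb then pvALoop rest (!insg) indb esc (c :: res)
    else if c == '"' && !insg then pvALoop rest insg (!indb) esc (c :: res)
    else if c == '#' && (!insg && !indb) then res.reverse
    else pvALoop rest insg indb esc (c :: res)

def strip_hash_comments_py (content : String) : String :=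
  PySem.Str.join "\n" ((PySem.Str.splitlines content).map
    (fun line => PySem.Str.rstrip (String.ofList (pvALoop line.toList false false false []))))

-- ===== PORT B =====
-- B's _skip_str: scanning the rest of the line after an opening quote q, advance the index i
-- just past the closing quote; '\\' skips two characters.  Returns (remaining chars, new index).
def pvSkipStr (q : Char) : List Char → Nat → (List Char × Nat)
  | [], i => ([], i)
  | c :: rest, i =>
    if c == '\\' then
      match rest with
      | [] => ([], i + 2)
      | _ :: r2 => pvSkipStr q r2 (i + 2)
    else if c == q then (rest, i + 1)
    else pvSkipStr q rest (i + 1)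

-- cited by pvFindHash's decreasing_by (the port needs it for termination)
theorem pvSkipStr_fst_length_le (q : Char) (l : List Char) (i : Nat) :
    (pvSkipStr q l i).1.length ≤ l.length := by
  fun_induction pvSkipStr q l i <;> simp_all <;> omega

-- B's _find_hash: index of the first '#' outside string literals, or none.
def pvFindHash : List Char → Nat → Option Nat
  | [], _ => none
  | c :: rest, i =>
    if c == '#' then some i
    else if c == '\'' || c == '"' then
      pvFindHash (pvSkipStr c rest (i + 1)).1 (pvSkipStr c rest (i + 1)).2
    else pvFindHash rest (i + 1)
  termination_by l => l.length
  decreasing_by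
  · exact Nat.lt_succ_of_le (pvSkipStr_fst_length_le c rest (i + 1))
  · simp

def strip_hash_comments_py_alt (content : String) : String :=
  PySem.Str.join "\n" ((PySem.Str.splitlines content).map
    (fun line =>
      match pvFindHash line.toList 0 with
      | none => PySem.Str.rstrip line
      | some k => PySem.Str.rstrip (String.ofList (line.toList.take k))))

-- ===== PRECONDITION & SPEC =====
def Spec_strip_hash_comments_py (content : String) (out : String) : Prop := out = strip_hash_comments_py_alt content
instance (content : String) (out : String) : Decidable (Spec_strip_hash_comments_py content out) := by unfold Spec_strip_hash_comments_py; infer_instance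

-- ===== CLAIM (what is proved, stated in full; the proofs are below) =====
def Claim_equal_strip_hash_comments_py : Prop := ∀ (content : String), Dom_strip_hash_comments_py content → Spec_strip_hash_comments_py content (strip_hash_comments_py content)

-- ===== LEMMAS AND PROOFS =====

theorem pvSkipStr_le_snd (q : Char) (l : List Char) (i : Nat) : i ≤ (pvSkipStr q l i).2 := by
  fun_induction pvSkipStr q l i <;> simp_all <;> omega

theorem pvSkipStr_shift_aux (q : Char) : ∀ (n : Nat) (l : List Char), l.length ≤ n → ∀ i,
    pvSkipStr q l i = ((pvSkipStr q l 0).1, (pvSkipStr q l 0).2 + i) := by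
  intro n
  induction n with
  | zero => intro l hl i; match l with | [] => simp [pvSkipStr]
  | succ n ih =>
    intro l hl i
    match l with
    | [] => simp [pvSkipStr]
    | [c] =>
      rw [pvSkipStr.eq_2, pvSkipStr.eq_2]
      split
      · simp; omega
      · split
        · simp; omega
        · simp [pvSkipStr]; omega
    | c :: c2 :: r2 =>
      rw [pvSkipStr.eq_3, pvSkipStr.eq_3]
      have h2 : r2.length ≤ n := by simp at hl; omega
      have h1 : (c2 :: r2).length ≤ n := by simp at hl; simp; omega
      split
      · rw [ih r2 h2 (i + 2), ih r2 h2 (0 + 2)]; simp; omega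
      · split
        · simp; omega
        · rw [ih _ h1 (i + 1), ih _ h1 (0 + 1)]; simp; omega

theorem pvSkipStr_shift (q : Char) (l : List Char) (i : Nat) :
    pvSkipStr q l i = ((pvSkipStr q l 0).1, (pvSkipStr q l 0).2 + i) :=
  pvSkipStr_shift_aux q l.length l le_rfl i

theorem pvSkipStr_fst_eq_drop_aux (q : Char) (l : List Char) (i : Nat) :
    (pvSkipStr q l i).1 = l.drop ((pvSkipStr q l i).2 - i) := by
  fun_induction pvSkipStr q l i with
  | case1 => simp
  | case2 => simp
  | case3 c i hb c2 r2 ih =>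
      have hle := pvSkipStr_le_snd q r2 (i + 2)
      rw [ih]
      have : (pvSkipStr q r2 (i + 2)).2 - i = ((pvSkipStr q r2 (i + 2)).2 - (i + 2)) + 2 := by omega
      rw [this]; rfl
  | case4 => simp
  | case5 c rest i hb hq ih =>
      have hle := pvSkipStr_le_snd q rest (i + 1)
      rw [ih]
      have : (pvSkipStr q rest (i + 1)).2 - i = ((pvSkipStr q rest (i + 1)).2 - (i + 1)) + 1 := by omega
      rw [this]; rfl

theorem pvSkipStr_fst_eq_drop (q : Char) (l : List Char) :
    (pvSkipStr q l 0).1 = l.drop (pvSkipStr q l 0).2 := by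
  simpa using pvSkipStr_fst_eq_drop_aux q l 0

theorem pvFindHash_shift_aux : ∀ (n : Nat) (l : List Char), l.length ≤ n → ∀ i,
    pvFindHash l i = (pvFindHash l 0).map (· + i) := by
  intro n
  induction n with
  | zero => intro l hl i; match l with | [] => simp [pvFindHash]
  | succ n ih =>
    intro l hl i
    match l with
    | [] => simp [pvFindHash]
    | c :: rest =>
      rw [pvFindHash.eq_2, pvFindHash.eq_2]
      by_cases hh : c == '#'
      · simp [hh]
      · simp only [hh, if_false, Bool.false_eq_true]
        by_cases hq : c == '\'' || c == '"'
        · simp only [hq, if_true]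
          rw [pvSkipStr_shift c rest (i+1), pvSkipStr_shift c rest (0+1)]
          have hlen : (pvSkipStr c rest 0).1.length ≤ n :=
            le_trans (pvSkipStr_fst_length_le c rest 0) (by simp at hl; omega)
          rw [ih _ hlen ((pvSkipStr c rest 0).2 + (i+1)), ih _ hlen ((pvSkipStr c rest 0).2 + (0+1))]
          cases pvFindHash (pvSkipStr c rest 0).1 0 <;> simp <;> omega
        · simp only [hq, if_false, Bool.false_eq_true]
          have hlen : rest.length ≤ n := by simp at hl; omega
          rw [ih rest hlen (i+1), ih rest hlen 1]
          cases pvFindHash rest 0 <;> simp <;> omega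


theorem pvALoop_inStr_aux (q : Char) (hq : q = '\'' ∨ q = '"') :
    ∀ (n : Nat) (l : List Char), l.length ≤ n → ∀ res,
      pvALoop l (q == '\'') (q == '"') false res
        = pvALoop (pvSkipStr q l 0).1 false false false
            ((l.take (pvSkipStr q l 0).2).reverse ++ res) := by
  intro n
  induction n with
  | zero => intro l hl res; match l with | [] => simp [pvALoop, pvSkipStr]
  | succ n ih =>
    intro l hl res
    have hor : ((q == '\'') || (q == '"')) = true := by rcases hq with rfl | rfl <;> simp
    match l with
    | [] => simp [pvALoop, pvSkipStr]
    | c :: rest =>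
      rw [pvALoop.eq_2, if_neg (by simp : ¬ (false = true))]
      by_cases hb : c == '\\'
      · rw [if_pos (by simp [hb, hor])]
        match rest with
        | [] =>
          rw [pvSkipStr.eq_2, if_pos hb]
          simp [pvALoop]
        | c2 :: r2 =>
          rw [pvALoop.eq_2, if_pos rfl]
          rw [pvSkipStr.eq_3, if_pos hb, pvSkipStr_shift q r2 (0 + 2)]
          have h2 : r2.length ≤ n := by simp at hl; omega
          rw [ih r2 h2 (c2 :: c :: res)]
          simp
      · rw [if_neg (by simp [hb])]
        by_cases hcq : c == q
        · have hstep : pvSkipStr q (c :: rest) 0 = (rest, 1) := by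
            cases rest
            · rw [pvSkipStr.eq_2, if_neg hb, if_pos hcq]
            · rw [pvSkipStr.eq_3, if_neg hb, if_pos hcq]
          have hcq' : c = q := by simpa using hcq
          subst hcq'
          rw [hstep]
          rcases hq with rfl | rfl
          · rw [if_pos (by simp)]
            simp
          · rw [if_neg (by simp), if_pos (by simp)]
            simp
        · -- ordinary character inside the string (includes the other quote and '#')
          have hstep : pvSkipStr q (c :: rest) 0 = ((pvSkipStr q rest 0).1, (pvSkipStr q rest 0).2 + 1) := by
            cases rest
            · rw [pvSkipStr.eq_2, if_neg hb, if_neg hcq]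
              simp [pvSkipStr]
            · rw [pvSkipStr.eq_3, if_neg hb, if_neg hcq, pvSkipStr_shift q _ (0 + 1)]
          have h1 : rest.length ≤ n := by simp at hl; omega
          have tail : pvALoop rest (q == '\'') (q == '"') false (c :: res)
              = pvALoop (pvSkipStr q rest 0).1 false false false
                  ((rest.take (pvSkipStr q rest 0).2).reverse ++ (c :: res)) := ih rest h1 (c :: res)
          rw [hstep]
          rcases hq with rfl | rfl
          · rw [if_neg (by simp [show ¬ c = '\'' by simpa using hcq]),
              if_neg (by simp), if_neg (by simp)]
            rw [tail]
            simp
          · rw [if_neg (by simp), if_neg (by simp [show ¬ c = '"' by simpa using hcq]),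
              if_neg (by simp)]
            rw [tail]
            simp

theorem pvALoop_inStr (q : Char) (hq : q = '\'' ∨ q = '"') (l res : List Char) :
    pvALoop l (q == '\'') (q == '"') false res
      = pvALoop (pvSkipStr q l 0).1 false false false
          ((l.take (pvSkipStr q l 0).2).reverse ++ res) :=
  pvALoop_inStr_aux q hq l.length l le_rfl res

def pvCut (l : List Char) : Nat := (pvFindHash l 0).getD l.length


theorem pvALoop_top_aux : ∀ (n : Nat) (l : List Char), l.length ≤ n → ∀ res,
    pvALoop l false false false res = res.reverse ++ l.take (pvCut l) := by
  intro n
  induction n with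
  | zero => intro l hl res; match l with | [] => simp [pvALoop, pvCut, pvFindHash]
  | succ n ih =>
    intro l hl res
    match l with
    | [] => simp [pvALoop, pvCut, pvFindHash]
    | c :: rest =>
      by_cases hh : c == '#'
      · have hc : c = '#' := by simpa using hh
        subst hc
        rw [pvALoop.eq_2]
        simp only [if_neg (by simp : ¬ (false = true)), if_neg (by simp : ¬ (('#' == '\\' && (false || false)) = true)),
          if_neg (by simp : ¬ (('#' == '\'' && !false) = true)), if_neg (by simp : ¬ (('#' == '"' && !false) = true)),
          if_pos (by simp : ('#' == '#' && (!false && !false)) = true)]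
        simp [pvCut, pvFindHash.eq_2]
      · by_cases hq : c == '\'' || c == '"'
        · have hq' : c = '\'' ∨ c = '"' := by
            rcases Bool.or_eq_true_iff.mp hq with h | h
            · exact Or.inl (by simpa using h)
            · exact Or.inr (by simpa using h)
          have hstep : pvALoop (c :: rest) false false false res
              = pvALoop rest (c == '\'') (c == '"') false (c :: res) := by
            rw [pvALoop.eq_2, if_neg (by simp : ¬ (false = true)), if_neg (by simp)]
            rcases hq' with rfl | rfl
            · rw [if_pos (by simp)]; simp
            · rw [if_neg (by simp), if_pos (by simp)]; simp
          rw [hstep, pvALoop_inStr c hq' rest (c :: res)]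
          have hlen : (pvSkipStr c rest 0).1.length ≤ n :=
            le_trans (pvSkipStr_fst_length_le c rest 0) (by simp at hl; omega)
          rw [ih _ hlen]
          have hfind : pvFindHash (c :: rest) 0
              = (pvFindHash (pvSkipStr c rest 0).1 0).map (· + ((pvSkipStr c rest 0).2 + 1)) := by
            rw [pvFindHash.eq_2, if_neg hh, if_pos hq, pvSkipStr_shift c rest (0 + 1)]
            rw [pvFindHash_shift_aux (pvSkipStr c rest 0).1.length _ le_rfl]
          have hdrop := pvSkipStr_fst_eq_drop c rest
          cases hf : pvFindHash (pvSkipStr c rest 0).1 0 with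
          | none =>
            rw [hf] at hfind
            rw [hdrop] at hf
            simp only [pvCut, hfind, Option.map_none, Option.getD_none, List.take_length, hdrop]
            simp [hf, ← List.length_drop, List.take_append_drop]
          | some k =>
            rw [hf] at hfind
            rw [hdrop] at hf
            simp only [pvCut, hfind, Option.map_some, Option.getD_some, hdrop]
            have harith : k + ((pvSkipStr c rest 0).2 + 1) = ((pvSkipStr c rest 0).2 + k) + 1 := by omega
            rw [harith, List.take_succ_cons, List.take_add]
            simp [hf]
        · have hq1 : ¬ c = '\'' := by intro h; exact hq (by simp [h])
          have hq2 : ¬ c = '"' := by intro h; exact hq (by simp [h])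
          have hstep : pvALoop (c :: rest) false false false res
              = pvALoop rest false false false (c :: res) := by
            rw [pvALoop.eq_2, if_neg (by simp : ¬ (false = true)), if_neg (by simp),
              if_neg (by simp [hq1]), if_neg (by simp [hq2]), if_neg (by simp [show ¬ c = '#' by simpa using hh])]
          have h1 : rest.length ≤ n := by simp at hl; omega
          rw [hstep, ih rest h1]
          have hfind : pvFindHash (c :: rest) 0 = (pvFindHash rest 0).map (· + 1) := by
            rw [pvFindHash.eq_2, if_neg hh, if_neg (by simpa using hq),
              pvFindHash_shift_aux rest.length rest le_rfl 1]
          cases hf : pvFindHash rest 0 with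
          | none =>
            rw [hf] at hfind
            simp [pvCut, hfind, hf]
          | some k =>
            rw [hf] at hfind
            simp [pvCut, hfind, hf, List.take_succ_cons]

theorem pvALoop_top (l res : List Char) :
    pvALoop l false false false res = res.reverse ++ l.take (pvCut l) :=
  pvALoop_top_aux l.length l le_rfl res

theorem pvPerLine (line : String) :
    PySem.Str.rstrip (String.ofList (pvALoop line.toList false false false []))
      = (match pvFindHash line.toList 0 with
         | none => PySem.Str.rstrip line
         | some k => PySem.Str.rstrip (String.ofList (line.toList.take k))) := by
  rw [pvALoop_top line.toList []]
  cases hf : pvFindHash line.toList 0 with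
  | none =>
    simp only [pvCut, hf, Option.getD_none]
    rw [List.reverse_nil, List.nil_append, List.take_length, String.ofList_toList]
  | some k => simp [pvCut, hf]

-- ===== VERDICT (by name: the statement is the Claim_ definition above) =====
theorem strip_hash_comments_py_spec : Claim_equal_strip_hash_comments_py := by
  intro content _
  unfold Spec_strip_hash_comments_py strip_hash_comments_py strip_hash_comments_py_alt
  exact congrArg (PySem.Str.join "\n")
    (List.map_congr_left (fun line _ => pvPerLine line))
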